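-- pv_equiv track=rewrite | github.com/BrunoBiluca/biluca-knowledge | Desafios - Código/Playing Card Odds/Playing Card Odds.py | split_card_sets
-- ===== SOURCE A (Python) =====
-- def split_card_sets(descriptive):
--     card_sets = []
--     card_set = {"cards": "", "suits": ""}
--
--     set_delimiter_defined = False
--     for c in descriptive:
--         if c in available_cards:
--             if set_delimiter_defined:
--                 card_sets.append(card_set)
--                 card_set = {"cards": "", "suits": ""}
--                 set_delimiter_defined = False
--
--             card_set["cards"] += c
--         elif c in available_suits:
--             set_delimiter_defined = True
--             card_set["suits"] += c
--     else:
--         card_sets.append(card_set)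
--
--     for s in card_sets:
--         if s["cards"] == "":
--             s["cards"] = available_cards
--
--         if s["suits"] == "":
--             s["suits"] = available_suits
--
--
--     return card_sets
--
-- available_cards = "23456789TJQKA"
--
-- available_suits = "CDHS"
-- ===== SOURCE B (Python) =====
-- available_cards = "23456789TJQKA"
-- available_suits = "CDHS"
--
-- def split_card_sets(descriptive):
--     # Build the sets back-to-front: scan from the right, starting a new set
--     # whenever a suit char is followed (to the right) by a set that already has cards.
--     sets = [("", "")]
--     for c in reversed(descriptive):
--         if c in available_cards:
--             cards, suits = sets[0]
--             sets[0] = (c + cards, suits)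
--         elif c in available_suits:
--             cards, suits = sets[0]
--             if cards != "":
--                 sets.insert(0, ("", c))
--             else:
--                 sets[0] = (cards, c + suits)
--     return [{"cards": cards or available_cards, "suits": suits or available_suits}
--             for cards, suits in sets]
-- ===== Notes on version B (the rewrite author's own statement) =====
-- stated objective: alternative
-- what changed: B replaces A's left-to-right state machine (delimiter flag, close-and-append on a card after a suit) by a right-to-left scan that builds the list of sets back-to-front, opening a new set when a suit is seen to the left of a set that already has cards, with the empty-field defaults applied in a final comprehension.
import Mathlib
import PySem

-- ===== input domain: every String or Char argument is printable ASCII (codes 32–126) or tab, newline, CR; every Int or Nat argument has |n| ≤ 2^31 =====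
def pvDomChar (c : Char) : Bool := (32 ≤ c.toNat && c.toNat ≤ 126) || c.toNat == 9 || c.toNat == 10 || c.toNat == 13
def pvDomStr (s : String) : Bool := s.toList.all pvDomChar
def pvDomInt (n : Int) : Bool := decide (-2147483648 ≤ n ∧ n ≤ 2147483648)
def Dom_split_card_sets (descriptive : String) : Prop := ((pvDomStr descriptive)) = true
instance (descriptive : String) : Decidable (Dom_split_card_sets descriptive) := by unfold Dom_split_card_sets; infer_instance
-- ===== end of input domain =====

-- B rebuilds the sets back-to-front with a right-to-left scan instead of A's left-to-right
-- flag state machine (objective: alternative). Python strings are modeled exactly as List Char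
-- (concatenation, membership and == "" coincide), rendered to String only in the final output;
-- A's two-key dict {"cards","suits"} is exactly the two-entry association list built at the end.

-- ===== PORT A =====
def availCardsA : List Char := "23456789TJQKA".toList
def availSuitsA : List Char := "CDHS".toList

-- state: (card_sets, card_set as (cards, suits), set_delimiter_defined)
def stepA (st : List (List Char × List Char) × (List Char × List Char) × Bool) (c : Char) :
    List (List Char × List Char) × (List Char × List Char) × Bool :=
  if c ∈ availCardsA then
    if st.2.2 then (st.1 ++ [st.2.1], ([c], []), false)   -- append card_set, fresh set, cards += c
    else (st.1, (st.2.1.1 ++ [c], st.2.1.2), st.2.2)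
  else if c ∈ availSuitsA then (st.1, (st.2.1.1, st.2.1.2 ++ [c]), true)
  else st

-- the second for-loop: empty fields are replaced by the defaults (dict rendered as assoc list)
def fillA (p : List Char × List Char) : List (String × String) :=
  [("cards", String.ofList (if p.1 = [] then availCardsA else p.1)),
   ("suits", String.ofList (if p.2 = [] then availSuitsA else p.2))]

def split_card_sets (descriptive : String) : List (List (String × String)) :=
  -- for…else: the last card_set is always appended
  ((descriptive.toList.foldl stepA ([], ([], []), false)).1
    ++ [(descriptive.toList.foldl stepA ([], ([], []), false)).2.1]).map fillA

-- ===== PORT B =====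
def availCardsB : List Char := "23456789TJQKA".toList
def availSuitsB : List Char := "CDHS".toList

-- right-to-left step: a suit seen to the left of a set that already has cards opens a new set
def stepB (c : Char) (sets : List (List Char × List Char)) : List (List Char × List Char) :=
  if c ∈ availCardsB then
    match sets with
    | (cards, suits) :: rest => (c :: cards, suits) :: rest
    | [] => []
  else if c ∈ availSuitsB then
    match sets with
    | (cards, suits) :: rest =>
        if cards ≠ [] then ([], [c]) :: (cards, suits) :: rest
        else (cards, c :: suits) :: rest
    | [] => []
  else sets

def fillB (p : List Char × List Char) : List (String × String) :=
  [("cards", String.ofList (if p.1 = [] then availCardsB else p.1)),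
   ("suits", String.ofList (if p.2 = [] then availSuitsB else p.2))]

def split_card_sets_alt (descriptive : String) : List (List (String × String)) :=
  (descriptive.toList.foldr stepB [([], [])]).map fillB

-- ===== PRECONDITION & SPEC =====
def Spec_split_card_sets (descriptive : String) (out : List (List (String × String))) : Prop := out = split_card_sets_alt descriptive
instance (descriptive : String) (out : List (List (String × String))) : Decidable (Spec_split_card_sets descriptive out) := by unfold Spec_split_card_sets; infer_instance

-- ===== CLAIM (what is proved, stated in full; the proofs are below) =====
def Claim_equal_split_card_sets : Prop := ∀ (descriptive : String), Dom_split_card_sets descriptive → Spec_split_card_sets descriptive (split_card_sets descriptive)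

-- ===== LEMMAS AND PROOFS =====

-- merging A's in-flight card_set (cs, ss) into the sets B built for the remaining suffix
def combine (cs ss : List Char) (m : List (List Char × List Char)) : List (List Char × List Char) :=
  match m with
  | [] => [(cs, ss)]
  | (c0, s0) :: rest =>
      if ss ≠ [] ∧ c0 ≠ [] then (cs, ss) :: (c0, s0) :: rest
      else (cs ++ c0, ss ++ s0) :: rest

lemma stepB_ne_nil (c : Char) (m : List (List Char × List Char)) (h : m ≠ []) :
    stepB c m ≠ [] := by
  match m with
  | [] => exact absurd rfl h
  | (cards, suits) :: rest =>
    simp only [stepB]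
    split_ifs <;> simp

lemma runB_ne_nil (l : List Char) : l.foldr stepB [([], [])] ≠ [] := by
  induction l with
  | nil => simp
  | cons c l ih => exact stepB_ne_nil c _ ih

lemma mainA (l : List Char) : ∀ (done : List (List Char × List Char)) (cs ss : List Char) (flag : Bool),
    (flag = true ↔ ss ≠ []) →
    ((l.foldl stepA (done, (cs, ss), flag)).1 ++ [(l.foldl stepA (done, (cs, ss), flag)).2.1])
      = done ++ combine cs ss (l.foldr stepB [([], [])]) := by
  induction l with
  | nil =>
    intro done cs ss flag hf
    simp [combine]
  | cons c l ih =>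
    intro done cs ss flag hf
    obtain ⟨⟨c0, s0⟩, rest, hr⟩ := List.exists_cons_of_ne_nil (runB_ne_nil l)
    have hBA : availCardsB = availCardsA := rfl
    have hSA : availSuitsB = availSuitsA := rfl
    by_cases hc : c ∈ availCardsA
    · cases flag with
      | true =>
        have hss : ss ≠ [] := hf.mp rfl
        have := ih (done ++ [(cs, ss)]) [c] [] false (by simp)
        simp only [List.foldl_cons, List.foldr_cons, stepA, stepB, hc, hBA, if_true]
        rw [this, hr]
        simp [combine, hss]
      | false =>
        have hss : ss = [] := by
          by_contra h
          exact Bool.false_ne_true (hf.mpr h)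
        subst hss
        have := ih done (cs ++ [c]) [] false (by simp)
        simp only [List.foldl_cons, List.foldr_cons, stepA, stepB, hc, hBA, if_true, if_false, Bool.false_eq_true]
        rw [this, hr]
        simp [combine]
    · by_cases hs : c ∈ availSuitsA
      · have := ih done cs (ss ++ [c]) true (by simp)
        simp only [List.foldl_cons, List.foldr_cons, stepA, stepB, hc, hs, hBA, hSA,
          if_true, if_false]
        rw [this, hr]
        by_cases hc0 : c0 = []
        · subst hc0
          simp [combine]
        · simp [combine, hc0]
      · have := ih done cs ss flag hf
        simp only [List.foldl_cons, List.foldr_cons, stepA, stepB, hc, hs, hBA, hSA,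
          if_false]
        exact this

-- ===== VERDICT (by name: the statement is the Claim_ definition above) =====
theorem split_card_sets_spec : Claim_equal_split_card_sets := by
  intro descriptive _
  unfold Spec_split_card_sets split_card_sets split_card_sets_alt
  obtain ⟨⟨c0, s0⟩, rest, hr⟩ := List.exists_cons_of_ne_nil (runB_ne_nil descriptive.toList)
  have h := mainA descriptive.toList [] [] [] false (by simp)
  simp only at h
  rw [h, hr]
  simp [combine, show fillA = fillB from rfl]
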